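-- pv_equiv track=rewrite | github.com/PetitSamuel/genre_predictor | Main.py | tokenize_genres
-- ===== SOURCE A (Python) =====
-- def tokenize_genres(genres):
--     genre_tokens = []
--     for g in genres:
--         if "-" in g:
--             hyphen_split = g.split("-")
--             g = tokenize_genres(hyphen_split)
--             for subg in g:
--                 if subg not in genre_tokens:
--                     genre_tokens.append(subg)
--         else:
--             space_split = g.split()
--             for subg in space_split:
--                 if subg not in genre_tokens:
--                     genre_tokens.append(subg)
--
--     return genre_tokens
-- ===== SOURCE B (Python) =====
-- def tokenize_genres(genres):
--     out = []
--     for g in genres: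
--         for t in g.replace("-", " ").split():
--             if t not in out:
--                 out.append(t)
--     return out
-- ===== Notes on version B (the rewrite author's own statement) =====
-- stated objective: simpler
-- what changed: Replaces A's one-level recursion with its hyphen-then-whitespace two-stage split by a single flat loop that tokenizes each genre with g.replace('-', ' ').split() and dedups globally.
import Mathlib
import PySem

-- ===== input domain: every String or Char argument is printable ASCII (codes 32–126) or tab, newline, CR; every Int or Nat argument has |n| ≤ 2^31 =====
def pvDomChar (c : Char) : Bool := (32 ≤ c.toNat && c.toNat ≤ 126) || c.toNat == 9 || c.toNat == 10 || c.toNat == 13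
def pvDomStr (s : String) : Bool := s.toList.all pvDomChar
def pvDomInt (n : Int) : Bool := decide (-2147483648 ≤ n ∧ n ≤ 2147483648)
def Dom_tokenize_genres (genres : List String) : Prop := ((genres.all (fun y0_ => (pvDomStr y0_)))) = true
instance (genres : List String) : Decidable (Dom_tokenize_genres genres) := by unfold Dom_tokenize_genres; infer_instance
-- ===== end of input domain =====

-- B replaces A's one-level recursion with its hyphen-then-whitespace two-stage split by one flat
-- loop tokenizing each genre with g.replace("-", " ").split() and deduplicating globally (simpler).

-- ===== PORT A =====
-- spec of one g.split("-") step (single-char separator), used for A's termination measure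
def pvSplitChar : List Char → List Char → List (List Char)
  | [], cur => [cur.reverse]
  | c :: cs, cur => if c = '-' then cur.reverse :: pvSplitChar cs [] else pvSplitChar cs (c :: cur)

theorem pvSplitOn_go_eq (fuel : Nat) (l cur : List Char) (acc : List (List Char))
    (h : l.length < fuel) :
    PySem.Chars.splitOn.go ['-'] fuel l cur acc = acc.reverse ++ pvSplitChar l cur := by
  induction fuel generalizing l cur acc with
  | zero => omega
  | succ n ih =>
    rw [PySem.Chars.splitOn.go.eq_def]
    match l with
    | [] => simp [pvSplitChar]
    | c :: rest =>
      by_cases hc : c = '-'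
      · subst hc
        simp only [List.isPrefixOf, BEq.rfl, Bool.and_self, if_true]
        rw [ih _ _ _ (by simpa using Nat.lt_of_succ_lt_succ h)]
        simp [pvSplitChar]
      · have : (['-'].isPrefixOf (c :: rest)) = false := by
          simp [List.isPrefixOf]; exact fun h' => (hc h'.symm).elim
        simp only [this, if_neg, Bool.false_eq_true, not_false_eq_true]
        rw [ih _ _ _ (by simpa using Nat.lt_of_succ_lt_succ h)]
        simp [pvSplitChar, hc]

theorem pvSplitOn_eq (l : List Char) :
    PySem.Chars.splitOn l ['-'] = pvSplitChar l [] := by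
  unfold PySem.Chars.splitOn
  rw [pvSplitOn_go_eq _ _ _ _ (by omega)]; rfl

theorem pvSplitChar_no_hyphen (l : List Char) : ∀ (cur : List Char), '-' ∉ cur →
    ∀ p ∈ pvSplitChar l cur, '-' ∉ p := by
  induction l with
  | nil =>
    intro cur hcur p hp
    simp only [pvSplitChar, List.mem_singleton] at hp
    subst hp; simpa using hcur
  | cons c cs ih =>
    intro cur hcur p hp
    by_cases hc : c = '-'
    · subst hc
      rw [pvSplitChar, if_pos rfl] at hp
      rcases List.mem_cons.mp hp with rfl | hp'
      · simpa using hcur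
      · exact ih [] (by simp) p hp'
    · rw [pvSplitChar, if_neg hc] at hp
      exact ih (c :: cur) (by simp [hcur, Ne.symm hc]) p hp

-- number of '-' characters in a list of strings: A's recursion measure
def pvHyph (l : List String) : Nat := (l.map (fun s => s.toList.count '-')).sum

-- g.split("-") ported at the Chars level (exact: sep = "-" is non-empty, so Python never raises)
def pvPyHyphenSplit (g : String) : List String :=
  (PySem.Chars.splitOn g.toList ['-']).map String.ofList

theorem pvHyph_split (g : String) : pvHyph (pvPyHyphenSplit g) = 0 := by
  unfold pvHyph pvPyHyphenSplit
  rw [pvSplitOn_eq, List.map_map]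
  rw [List.sum_eq_zero]
  intro x hx
  simp only [List.mem_map, Function.comp] at hx
  obtain ⟨p, hp, rfl⟩ := hx
  have := pvSplitChar_no_hyphen g.toList [] (by simp) p hp
  simp [List.count_eq_zero, this]

theorem pvHyph_pos (g : String) (rest : List String) (h : PySem.Str.isIn "-" g = true) :
    0 < pvHyph (g :: rest) := by
  have hinf : ("-" : String).toList <:+: g.toList := (PySem.Str.isIn_iff_infix _ _).mp h
  have hmem : '-' ∈ g.toList := by
    have := hinf.subset (by simp : '-' ∈ ("-" : String).toList)
    exact this
  unfold pvHyph
  simp only [List.map_cons, List.sum_cons]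
  have := List.count_pos_iff.mpr hmem
  omega

-- the loop of A, with genre_tokens as accumulator; the recursive call is A's tokenize_genres(hyphen_split)
def pvTokLoop : List String → List String → List String
  | [], genre_tokens => genre_tokens
  | g :: rest, genre_tokens =>
    if PySem.Str.isIn "-" g = true then
      let sub := pvTokLoop (pvPyHyphenSplit g) []
      pvTokLoop rest (sub.foldl (fun acc subg => if subg ∈ acc then acc else acc ++ [subg]) genre_tokens)
    else
      pvTokLoop rest ((PySem.Str.split₀ g).foldl
        (fun acc subg => if subg ∈ acc then acc else acc ++ [subg]) genre_tokens)
  termination_by l _ => (pvHyph l, l.length)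
  decreasing_by
  · exact Prod.Lex.left _ _ (by rw [pvHyph_split]; exact pvHyph_pos _ _ (by assumption))
  · have : pvHyph rest ≤ pvHyph (g :: rest) := by unfold pvHyph; simp
    rcases Nat.lt_or_eq_of_le this with h | h
    · exact Prod.Lex.left _ _ h
    · rw [h]; exact Prod.Lex.right _ (by simp)
  · have : pvHyph rest ≤ pvHyph (g :: rest) := by unfold pvHyph; simp
    rcases Nat.lt_or_eq_of_le this with h | h
    · exact Prod.Lex.left _ _ h
    · rw [h]; exact Prod.Lex.right _ (by simp)

def tokenize_genres (genres : List String) : List String := pvTokLoop genres []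

-- ===== PORT B =====
def tokenize_genres_alt (genres : List String) : List String :=
  genres.foldl (fun out g =>
    (PySem.Str.split₀ (PySem.Str.replace g "-" " ")).foldl
      (fun out t => if t ∈ out then out else out ++ [t]) out) []

-- ===== PRECONDITION & SPEC =====
def Spec_tokenize_genres (genres : List String) (out : List String) : Prop := out = tokenize_genres_alt genres
instance (genres : List String) (out : List String) : Decidable (Spec_tokenize_genres genres out) := by unfold Spec_tokenize_genres; infer_instance

-- ===== CLAIM (what is proved, stated in full; the proofs are below) =====
def Claim_equal_tokenize_genres : Prop := ∀ (genres : List String), Dom_tokenize_genres genres → Spec_tokenize_genres genres (tokenize_genres genres)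

-- ===== LEMMAS AND PROOFS =====

-- generic "split on p, drop empties" tokenizer, cur is the reversed current word
def pvTok (p : Char → Bool) : List Char → List Char → List (List Char)
  | [], cur => if cur.isEmpty then [] else [cur.reverse]
  | c :: cs, cur => if p c then (if cur.isEmpty then pvTok p cs [] else cur.reverse :: pvTok p cs []) else pvTok p cs (c :: cur)

def pvPH (c : Char) : Bool := PySem.Chars.isspace c || c == '-'

def pvStrTok (g : String) : List String := (pvTok pvPH g.toList []).map String.ofList

def pvDed (acc ts : List String) : List String :=
  ts.foldl (fun a s => if s ∈ a then a else a ++ [s]) acc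

def pvSel (seen : List String) : List String → List String
  | [] => []
  | t :: ts => if t ∈ seen then pvSel seen ts else t :: pvSel (seen ++ [t]) ts

-- (1) split₀.go is pvTok with isspace
theorem pvSplit₀_go_eq (l : List Char) : ∀ (cur : List Char) (acc : List (List Char)),
    PySem.Chars.split₀.go l cur acc = acc.reverse ++ pvTok PySem.Chars.isspace l cur := by
  induction l with
  | nil => intro cur acc; rw [PySem.Chars.split₀.go.eq_def, pvTok]; cases cur <;> simp
  | cons c cs ih =>
    intro cur acc
    rw [PySem.Chars.split₀.go.eq_def, pvTok]
    cases cur <;> split_ifs <;> simp [ih] <;> simp_all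

theorem pvSplit₀_eq (l : List Char) :
    PySem.Chars.split₀ l = pvTok PySem.Chars.isspace l [] := by
  unfold PySem.Chars.split₀; rw [pvSplit₀_go_eq]; rfl

-- (2) replace.go with single-char old/new is a map
def pvRepl (c : Char) : Char := if c = '-' then ' ' else c

theorem pvReplace_go_eq (fuel : Nat) : ∀ (l : List Char) (acc : List Char), l.length ≤ fuel →
    PySem.Chars.replace.go ['-'] [' '] fuel l acc = acc.reverse ++ l.map pvRepl := by
  induction fuel with
  | zero =>
    intro l acc h
    rw [PySem.Chars.replace.go.eq_def]
    have : l = [] := List.length_eq_zero_iff.mp (Nat.le_zero.mp h)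
    subst this; simp
  | succ n ih =>
    intro l acc h
    rw [PySem.Chars.replace.go.eq_def]
    match l with
    | [] => simp
    | c :: t =>
      by_cases hc : c = '-'
      · subst hc
        simp only [List.isPrefixOf, BEq.rfl, Bool.and_self, if_true]
        rw [ih _ _ (by simpa using h)]
        simp [pvRepl]
      · have hpre : (['-'].isPrefixOf (c :: t)) = false := by
          simp [List.isPrefixOf]; exact fun h' => (hc h'.symm).elim
        simp only [hpre, Bool.false_eq_true, if_false]
        rw [ih _ _ (by simpa using h)]
        simp [pvRepl, hc]

theorem pvReplace_eq (l : List Char) :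
    PySem.Chars.replace l ['-'] [' '] = l.map pvRepl := by
  unfold PySem.Chars.replace
  rw [if_neg (by simp), pvReplace_go_eq _ _ _ le_rfl]; rfl

-- (3) tokenizing the replaced string = tokenizing with the joint predicate
theorem pvTok_map_repl (l : List Char) : ∀ cur,
    pvTok PySem.Chars.isspace (l.map pvRepl) cur = pvTok pvPH l cur := by
  induction l with
  | nil => intro cur; rfl
  | cons c cs ih =>
    intro cur
    by_cases hc : c = '-'
    · subst hc
      have h1 : pvRepl '-' = ' ' := rfl
      have h2 : PySem.Chars.isspace ' ' = true := by decide
      have h3 : pvPH '-' = true := by decide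
      simp only [List.map_cons, h1, pvTok, h2, h3, if_true, ih]
    · have h1 : pvRepl c = c := if_neg hc
      have h2 : pvPH c = PySem.Chars.isspace c := by
        simp [pvPH, hc]
      simp only [List.map_cons, h1, pvTok, h2, ih]

-- (4) on hyphen-free input the two predicates tokenize alike
theorem pvTok_no_hyphen (l : List Char) : ∀ cur, '-' ∉ l →
    pvTok PySem.Chars.isspace l cur = pvTok pvPH l cur := by
  induction l with
  | nil => intro cur _; rfl
  | cons c cs ih =>
    intro cur h
    have hc : c ≠ '-' := fun e => h (e ▸ List.mem_cons_self)
    have hcs : '-' ∉ cs := fun e => h (List.mem_cons_of_mem _ e)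
    have h2 : pvPH c = PySem.Chars.isspace c := by simp [pvPH, hc]
    simp only [pvTok, h2, ih _ hcs]

-- (5) a separator splits the tokenization
theorem pvTok_append_sep (xs : List Char) {c : Char} (hc : pvPH c = true) (ys : List Char) :
    ∀ cur, pvTok pvPH (xs ++ c :: ys) cur = pvTok pvPH xs cur ++ pvTok pvPH ys [] := by
  induction xs with
  | nil => intro cur; simp only [List.nil_append, pvTok, hc, if_true]; split_ifs <;> simp
  | cons x xs ih =>
    intro cur
    simp only [List.cons_append, pvTok]
    split_ifs <;> simp [ih]

-- (6) flattening the per-piece tokenizations = tokenizing the whole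
theorem pvFlatten_splitChar (l : List Char) : ∀ cur, '-' ∉ cur →
    ((pvSplitChar l cur).map (fun q => pvTok PySem.Chars.isspace q [])).flatten
      = pvTok pvPH (cur.reverse ++ l) [] := by
  induction l with
  | nil =>
    intro cur hcur
    simp only [pvSplitChar, List.map_cons, List.map_nil, List.flatten_cons, List.flatten_nil,
      List.append_nil]
    rw [pvTok_no_hyphen _ _ (by simpa using hcur)]
  | cons c cs ih =>
    intro cur hcur
    by_cases hc : c = '-'
    · subst hc
      rw [pvSplitChar, if_pos rfl]
      simp only [List.map_cons, List.flatten_cons]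
      rw [pvTok_no_hyphen _ _ (by simpa using hcur), ih [] (by simp),
        pvTok_append_sep _ (by decide)]
      simp
    · rw [pvSplitChar, if_neg hc]
      rw [ih (c :: cur) (by simp [hcur, Ne.symm hc])]
      simp

-- dedup-append: the shared inner loop ("if subg not in out: out.append(subg)")
theorem pvDed_append (acc xs ys : List String) :
    pvDed acc (xs ++ ys) = pvDed (pvDed acc xs) ys := by simp [pvDed]

theorem pvDed_eq_sel (ts : List String) : ∀ acc, pvDed acc ts = acc ++ pvSel acc ts := by
  induction ts with
  | nil => intro acc; simp [pvDed, pvSel]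
  | cons t ts ih =>
    intro acc
    have hstep : pvDed acc (t :: ts) = pvDed (if t ∈ acc then acc else acc ++ [t]) ts := rfl
    by_cases h : t ∈ acc
    · rw [hstep, if_pos h, ih, pvSel, if_pos h]
    · rw [hstep, if_neg h, ih, pvSel, if_neg h]
      simp

theorem pvSel_sel (ts : List String) : ∀ (s t : List String), (∀ x ∈ s, x ∈ t) →
    pvSel t (pvSel s ts) = pvSel t ts := by
  induction ts with
  | nil => intro s t _; rfl
  | cons y ts ih =>
    intro s t hst
    by_cases hys : y ∈ s
    · rw [pvSel, if_pos hys, pvSel, if_pos (hst y hys), ih s t hst]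
    · have h1 : pvSel s (y :: ts) = y :: pvSel (s ++ [y]) ts := by rw [pvSel, if_neg hys]
      by_cases hyt : y ∈ t
      · have hsub : ∀ x ∈ s ++ [y], x ∈ t := by
          intro x hx
          rcases List.mem_append.mp hx with h | h
          · exact hst x h
          · rw [List.mem_singleton.mp h]; exact hyt
        rw [h1, pvSel, if_pos hyt, pvSel, if_pos hyt, ih (s ++ [y]) t hsub]
      · have hsub : ∀ x ∈ s ++ [y], x ∈ t ++ [y] := by
          intro x hx
          rcases List.mem_append.mp hx with h | h
          · exact List.mem_append.mpr (Or.inl (hst x h))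
          · exact List.mem_append.mpr (Or.inr h)
        rw [h1, pvSel, if_neg hyt, pvSel, if_neg hyt, ih (s ++ [y]) (t ++ [y]) hsub]

theorem pvDed_ded (acc ts : List String) : pvDed acc (pvDed [] ts) = pvDed acc ts := by
  have h0 : pvDed [] ts = pvSel [] ts := by rw [pvDed_eq_sel]; rfl
  rw [h0, pvDed_eq_sel, pvSel_sel ts [] acc (by simp), ← pvDed_eq_sel]

-- B's per-genre tokens are pvStrTok
theorem pvStrTok_B (g : String) :
    PySem.Str.split₀ (PySem.Str.replace g "-" " ") = pvStrTok g := by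
  have hinj : Function.Injective String.toList := by
    intro a b h
    have := congrArg String.ofList h
    simpa using this
  apply List.map_injective_iff.mpr hinj
  rw [PySem.Str.split₀_map_toList, PySem.Str.toList_replace]
  have h1 : ("-" : String).toList = ['-'] := rfl
  have h2 : (" " : String).toList = [' '] := rfl
  rw [h1, h2, pvReplace_eq, pvSplit₀_eq, pvTok_map_repl]
  simp [pvStrTok, List.map_map, Function.comp_def]

-- helper: isIn "-" false ↔ no '-' character
theorem pvNoHyphen_of_isIn_false (g : String) (h : PySem.Str.isIn "-" g = false) :
    '-' ∉ g.toList := by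
  intro hmem
  obtain ⟨s, t, hst⟩ := List.append_of_mem hmem
  have : ("-" : String).toList <:+: g.toList := ⟨s, t, by rw [hst]; simp⟩
  rw [(PySem.Str.isIn_iff_infix "-" _).mpr this] at h
  exact Bool.true_eq_false.mp h

-- A's per-genre tokens in the no-hyphen branch
theorem pvStrTok_A_nohyph (g : String) (h : PySem.Str.isIn "-" g = false) :
    PySem.Str.split₀ g = pvStrTok g := by
  have hinj : Function.Injective String.toList := by
    intro a b hh
    have := congrArg String.ofList hh
    simpa using this
  apply List.map_injective_iff.mpr hinj
  rw [PySem.Str.split₀_map_toList, pvSplit₀_eq,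
    pvTok_no_hyphen _ _ (pvNoHyphen_of_isIn_false g h)]
  simp [pvStrTok, List.map_map, Function.comp_def]

theorem pvPieces_nohyph (g : String) :
    ∀ p ∈ pvPyHyphenSplit g, PySem.Str.isIn "-" p = false := by
  intro p hp
  unfold pvPyHyphenSplit at hp
  rw [pvSplitOn_eq] at hp
  obtain ⟨q, hq, rfl⟩ := List.mem_map.mp hp
  have hnq : '-' ∉ q := pvSplitChar_no_hyphen g.toList [] (by simp) q hq
  cases hiu : PySem.Str.isIn "-" (String.ofList q) with
  | false => rfl
  | true =>
    have := (PySem.Str.isIn_iff_infix _ _).mp hiu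
    simp only [String.toList_ofList] at this
    exact absurd (this.subset (by simp)) hnq

-- A's loop on hyphen-free genres is a flat dedup-append
theorem pvLoop_nohyph (ps : List String) : ∀ acc, (∀ p ∈ ps, PySem.Str.isIn "-" p = false) →
    pvTokLoop ps acc = pvDed acc ((ps.map pvStrTok).flatten) := by
  induction ps with
  | nil => intro acc _; rw [pvTokLoop]; rfl
  | cons p ps ih =>
    intro acc h
    have hp : PySem.Str.isIn "-" p = false := h p List.mem_cons_self
    rw [pvTokLoop, if_neg (by intro hc; rw [hc] at hp; cases hp)]
    have hfold : (PySem.Str.split₀ p).foldl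
        (fun acc subg => if subg ∈ acc then acc else acc ++ [subg]) acc
        = pvDed acc (pvStrTok p) := by
      rw [← pvStrTok_A_nohyph p hp]; rfl
    rw [hfold, ih _ (fun q hq => h q (List.mem_cons_of_mem _ hq))]
    rw [List.map_cons, List.flatten_cons, pvDed_append]

-- A's recursive call on the hyphen split of g yields exactly g's tokens, deduplicated
theorem pvSub_eq (g : String) :
    pvTokLoop (pvPyHyphenSplit g) [] = pvDed [] (pvStrTok g) := by
  rw [pvLoop_nohyph _ _ (pvPieces_nohyph g)]
  congr 1
  unfold pvPyHyphenSplit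
  rw [pvSplitOn_eq, List.map_map]
  have hmap : (pvSplitChar g.toList []).map (pvStrTok ∘ String.ofList)
      = (pvSplitChar g.toList []).map (fun q => (pvTok PySem.Chars.isspace q []).map String.ofList) := by
    apply List.map_congr_left
    intro q hq
    have hnq : '-' ∉ q := pvSplitChar_no_hyphen g.toList [] (by simp) q hq
    simp only [Function.comp_apply, pvStrTok, String.toList_ofList,
      pvTok_no_hyphen q [] hnq]
  rw [hmap]
  have : (pvSplitChar g.toList []).map (fun q => (pvTok PySem.Chars.isspace q []).map String.ofList)
      = ((pvSplitChar g.toList []).map (fun q => pvTok PySem.Chars.isspace q [])).map (List.map String.ofList) := by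
    rw [List.map_map]; rfl
  rw [this, ← List.map_flatten, pvFlatten_splitChar g.toList [] (by simp)]
  rfl

-- A's loop is a flat fold of per-genre dedup-appends
theorem pvMainA (genres : List String) : ∀ acc,
    pvTokLoop genres acc = genres.foldl (fun a g => pvDed a (pvStrTok g)) acc := by
  induction genres with
  | nil => intro acc; rw [pvTokLoop]; rfl
  | cons g rest ih =>
    intro acc
    rw [pvTokLoop]
    by_cases h : PySem.Str.isIn "-" g = true
    · rw [if_pos h]
      show pvTokLoop rest (pvDed acc (pvTokLoop (pvPyHyphenSplit g) [])) = _
      rw [pvSub_eq, pvDed_ded, ih, List.foldl_cons]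
    · have hf : PySem.Str.isIn "-" g = false := by revert h; cases PySem.Str.isIn "-" g <;> simp
      rw [if_neg h]
      show pvTokLoop rest (pvDed acc (PySem.Str.split₀ g)) = _
      rw [pvStrTok_A_nohyph g hf, ih, List.foldl_cons]

-- B is the same flat fold
theorem pvMainB (genres : List String) :
    tokenize_genres_alt genres = genres.foldl (fun a g => pvDed a (pvStrTok g)) [] := by
  unfold tokenize_genres_alt
  simp only [pvStrTok_B]
  rfl

-- ===== VERDICT (by name: the statement is the Claim_ definition above) =====
theorem tokenize_genres_spec : Claim_equal_tokenize_genres := by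
  intro genres _
  unfold Spec_tokenize_genres tokenize_genres
  rw [pvMainA, pvMainB]
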